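-- pv_equiv track=rewrite | github.com/wardi/cpu | encoder.py | braillepixels
-- ===== SOURCE A (Python) =====
-- def braillepixels(ipx):
--     "return braille text version of intpixel matrix"
--     braille = []
--     # padded intpixel matrix to avoid IndexErrors
--     pipx = [r + [0] for r in ipx] + [[0] * (len(ipx[0]) + 1)] * 7
--     for y in range(0, len(ipx), 4):
--         braille.append(''.join(
--             chr(0x2800
--                 + 1 * pipx[y][x]
--                 + 2 * pipx[y + 1][x]
--                 + 4 * pipx[y + 2][x]
--                 + 8 * pipx[y][x + 1]
--                 + 16 * pipx[y + 1][x + 1]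
--                 + 32 * pipx[y + 2][x + 1]
--                 + 64 * pipx[y + 3][x]
--                 + 128 * pipx[y + 3][x + 1]
--             ) for x in range(0, len(ipx[0]), 2)
--         ))
--     return braille
-- ===== SOURCE B (Python) =====
-- WEIGHTS = ((1, 8), (2, 16), (4, 32), (64, 128))
--
--
-- def braillepixels(ipx):
--     "return braille text version of intpixel matrix"
--     width = 2 * ((len(ipx[0]) + 1) // 2)
--     cells = [[0x2800] * (width // 2) for _ in range((len(ipx) + 3) // 4)]
--     for y, row in enumerate(ipx):
--         for x, v in enumerate(row[:width]):
--             cells[y // 4][x // 2] += WEIGHTS[y % 4][x % 2] * v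
--     return [''.join(map(chr, r)) for r in cells]
-- ===== Notes on version B (the rewrite author's own statement) =====
-- stated objective: alternative
-- what changed: B replaces A's per-cell gather (eight indexed lookups into a zero-padded copy of the matrix for each braille cell) with a single scatter pass over the pixels that accumulates each pixel's dot weight into a preallocated table of cell code points, which is then rendered to strings.
import Mathlib
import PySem

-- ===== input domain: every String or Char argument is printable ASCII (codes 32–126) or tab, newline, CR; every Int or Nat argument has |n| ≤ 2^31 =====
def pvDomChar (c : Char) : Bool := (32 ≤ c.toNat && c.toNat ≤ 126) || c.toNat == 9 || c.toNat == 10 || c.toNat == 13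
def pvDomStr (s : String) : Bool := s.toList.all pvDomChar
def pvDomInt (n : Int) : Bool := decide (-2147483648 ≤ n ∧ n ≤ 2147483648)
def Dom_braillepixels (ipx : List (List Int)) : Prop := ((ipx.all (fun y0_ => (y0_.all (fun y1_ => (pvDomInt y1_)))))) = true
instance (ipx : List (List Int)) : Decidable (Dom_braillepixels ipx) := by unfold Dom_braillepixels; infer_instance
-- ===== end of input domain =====

-- B inverts the traversal: A gathers each braille cell's eight dots from a zero-padded copy of the
-- matrix; B makes one scatter pass over the pixels, each pixel adding its dot weight into an
-- accumulator table of cell code points (objective: alternative, same asymptotic cost).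

-- chr(n): exact whenever n is a valid non-surrogate code point, which Pre_ guarantees for every code both programs produce
def pvChr (n : Int) : Char := Char.ofNat n.toNat

-- ===== PORT A =====
-- A's lookup pipx[y][x]; under Pre_ every index A uses is in range, so the defaults are never the result
def pvLookA (pipx : List (List Int)) (y x : Int) : Int :=
  PySem.List.pyGetD (PySem.List.pyGetD pipx y []) x 0

def braillepixels (ipx : List (List Int)) : List String :=
  let c : Int := (ipx.headI.length : Int)
  let pipx := ipx.map (fun r => r ++ [0]) ++ List.replicate 7 (List.replicate (ipx.headI.length + 1) (0 : Int))
  (PySem.List.pyRange 0 (ipx.length : Int) 4).map (fun y =>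
    String.ofList ((PySem.List.pyRange 0 c 2).map (fun x =>
      pvChr (0x2800
        + 1 * pvLookA pipx y x
        + 2 * pvLookA pipx (y + 1) x
        + 4 * pvLookA pipx (y + 2) x
        + 8 * pvLookA pipx y (x + 1)
        + 16 * pvLookA pipx (y + 1) (x + 1)
        + 32 * pvLookA pipx (y + 2) (x + 1)
        + 64 * pvLookA pipx (y + 3) x
        + 128 * pvLookA pipx (y + 3) (x + 1)))))

-- ===== PORT B =====

def pvWeights : List (List Int) := [[1, 8], [2, 16], [4, 32], [64, 128]]

-- Source B's indices y//4, x//2, y%4, x%2 and the two list-replication counts are nonnegative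
-- (enumerate indices / lengths), so .toNat after PySem floordiv/mod is exact; row[:width] with
-- width ≥ 0 is .take width.toNat; cells[_][_] += … is List.modify (always in range in Source B);
-- ''.join(map(chr, r)) is String.ofList (r.map pvChr); len(ipx[0]) raises IndexError on empty
-- ipx (excluded by Pre_), headI is exact on nonempty ipx.
def braillepixels_alt (ipx : List (List Int)) : List String :=
  let width : Int := 2 * PySem.Int.floordiv ((ipx.headI.length : Int) + 1) 2
  let cells0 : List (List Int) :=
    List.replicate (PySem.Int.floordiv ((ipx.length : Int) + 3) 4).toNat
      (List.replicate (PySem.Int.floordiv width 2).toNat (0x2800 : Int))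
  let cells := (PySem.List.enumerate ipx).foldl (fun st p =>
    (PySem.List.enumerate (p.2.take width.toNat)).foldl (fun st2 q =>
      st2.modify (PySem.Int.floordiv p.1 4).toNat (fun row =>
        row.modify (PySem.Int.floordiv q.1 2).toNat
          (· + (pvWeights.getD (PySem.Int.mod p.1 4).toNat []).getD (PySem.Int.mod q.1 2).toNat 0 * q.2))) st) cells0
  cells.map (fun row => String.ofList (row.map pvChr))

-- ===== PRECONDITION & SPEC =====
-- pvAt/pvCode: the code point chr receives for the braille cell at (y, x) (0 beyond the matrix,
-- matching A's zero padding); defined here independently so Pre_ does not touch either port.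
def pvAt (ipx : List (List Int)) (y x : Nat) : Int := (ipx.getD y []).getD x 0
def pvCode (ipx : List (List Int)) (y x : Nat) : Int :=
  0x2800 + pvAt ipx y x + 2 * pvAt ipx (y + 1) x + 4 * pvAt ipx (y + 2) x
    + 8 * pvAt ipx y (x + 1) + 16 * pvAt ipx (y + 1) (x + 1) + 32 * pvAt ipx (y + 2) (x + 1)
    + 64 * pvAt ipx (y + 3) x + 128 * pvAt ipx (y + 3) (x + 1)

-- Pre_ is exactly where A returns a Lean-representable value: ipx nonempty (else len(ipx[0]) raises
-- IndexError), every row reaches the largest column index the first row makes A read (c if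
-- c = len(ipx[0]) is odd else c-1; shorter rows raise IndexError), and every cell's code point is a
-- valid chr argument outside the UTF-16 surrogate range 0xD800-0xDFFF (an invalid code raises
-- ValueError; a lone-surrogate string A does return, e.g. on [[45056]], is not representable as a
-- Lean String — on such inputs the Python B returns the same lone-surrogate value as A).
def Pre_braillepixels (ipx : List (List Int)) : Prop :=
  ipx ≠ [] ∧
  (∀ r ∈ ipx, (if ipx.headI.length % 2 = 1 then ipx.headI.length else ipx.headI.length - 1) ≤ r.length) ∧
  (∀ y ∈ List.range ipx.length, ∀ x ∈ List.range ipx.headI.length,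
    y % 4 = 0 → x % 2 = 0 →
      0 ≤ pvCode ipx y x ∧
        (pvCode ipx y x < 0xD800 ∨ (0xDFFF < pvCode ipx y x ∧ pvCode ipx y x < 0x110000)))
instance (ipx : List (List Int)) : Decidable (Pre_braillepixels ipx) := by
  unfold Pre_braillepixels; infer_instance

def pvWitness_braillepixels : List (List Int) := [[1, 0, 1], [0, 1, 1], [1, 1, 0], [0, 0, 1], [1, 0, 0]]

def Spec_braillepixels (ipx : List (List Int)) (out : List String) : Prop := out = braillepixels_alt ipx
instance (ipx : List (List Int)) (out : List String) : Decidable (Spec_braillepixels ipx out) := by unfold Spec_braillepixels; infer_instance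

-- ===== CLAIM (what is proved, stated in full; the proofs are below) =====
def Claim_equal_braillepixels : Prop := ∀ (ipx : List (List Int)), Dom_braillepixels ipx → Pre_braillepixels ipx → Spec_braillepixels ipx (braillepixels ipx)

-- ===== LEMMAS AND PROOFS =====

def pvRef (ipx : List (List Int)) : List String :=
  (List.range ((ipx.length + 3) / 4)).map (fun i =>
    String.ofList ((List.range ((ipx.headI.length + 1) / 2)).map (fun j =>
      pvChr (pvCode ipx (4 * i) (2 * j)))))

theorem pvFd4 (n : ℕ) : (PySem.Int.floordiv (n : ℤ) 4).toNat = n / 4 := by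
  rw [PySem.Int.floordiv, Int.fdiv_eq_ediv]; simp; omega

theorem pvFd2 (n : ℕ) : (PySem.Int.floordiv (n : ℤ) 2).toNat = n / 2 := by
  rw [PySem.Int.floordiv, Int.fdiv_eq_ediv]; simp; omega

theorem pvMd4 (n : ℕ) : (PySem.Int.mod (n : ℤ) 4).toNat = n % 4 := by
  rw [PySem.Int.mod, Int.fmod_eq_emod]; simp; omega

theorem pvMd2 (n : ℕ) : (PySem.Int.mod (n : ℤ) 2).toNat = n % 2 := by
  rw [PySem.Int.mod, Int.fmod_eq_emod]; simp; omega

theorem pvFdI2 (n : ℕ) : PySem.Int.floordiv (n : ℤ) 2 = ((n / 2 : ℕ) : ℤ) := by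
  rw [PySem.Int.floordiv, Int.fdiv_eq_ediv]
  simp

theorem pvFdI4 (n : ℕ) : PySem.Int.floordiv (n : ℤ) 4 = ((n / 4 : ℕ) : ℤ) := by
  rw [PySem.Int.floordiv, Int.fdiv_eq_ediv]
  simp

theorem pvGetD_modify {α : Type} (l : List α) (i k : ℕ) (f : α → α) (d : α) (hi : i < l.length) :
    (l.modify i f).getD k d = if i = k then f (l.getD k d) else l.getD k d := by
  simp only [List.getD_eq_getElem?_getD, List.getElem?_modify]
  by_cases h : i = k
  · subst h
    rw [List.getElem?_eq_getElem hi]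
    simp
  · simp [h]

def pvG (st : List (List Int)) (i j : ℕ) : Int := (st.getD i []).getD j 0

theorem pvG_getElem (st : List (List Int)) (i j : ℕ) (hi : i < st.length) (hj : j < st[i].length) :
    pvG st i j = st[i][j] := by
  rw [pvG, List.getD_eq_getElem?_getD (l := st), List.getElem?_eq_getElem hi, Option.getD_some,
    List.getD_eq_getElem?_getD, List.getElem?_eq_getElem hj, Option.getD_some]

theorem pvGetD_take (r : List Int) (Wn x : ℕ) (h : x < Wn) : (r.take Wn).getD x 0 = r.getD x 0 := by
  simp only [List.getD_eq_getElem?_getD, List.getElem?_take, if_pos h]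

def pvCellAdd (w0 w1 : Int) (j : ℕ) : List Int → ℕ → Int
  | [], _ => 0
  | v :: vs, n => (if n / 2 = j then (if n % 2 = 0 then w0 else w1) * v else 0) + pvCellAdd w0 w1 j vs (n + 1)

theorem pvCellAdd_eval (w0 w1 : Int) (j : ℕ) : ∀ (r : List Int) (n : ℕ),
    pvCellAdd w0 w1 j r n
      = (if n ≤ 2 * j then w0 * r.getD (2 * j - n) 0 else 0)
          + (if n ≤ 2 * j + 1 then w1 * r.getD (2 * j + 1 - n) 0 else 0) := by
  intro r
  induction r with
  | nil => intro n; simp [pvCellAdd]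
  | cons v vs ih =>
    intro n
    rw [pvCellAdd, ih (n + 1)]
    rcases Nat.lt_trichotomy n (2 * j) with h | h | h
    · have e1 : 2 * j - n = (2 * j - (n + 1)) + 1 := by omega
      have e2 : 2 * j + 1 - n = (2 * j + 1 - (n + 1)) + 1 := by omega
      rw [if_neg (by omega : ¬ n / 2 = j), if_pos (by omega : n ≤ 2 * j),
        if_pos (by omega : n ≤ 2 * j + 1), if_pos (by omega : n + 1 ≤ 2 * j),
        if_pos (by omega : n + 1 ≤ 2 * j + 1), e1, e2, List.getD_cons_succ, List.getD_cons_succ]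
      ring
    · subst h
      rw [if_pos (by omega : (2 * j) / 2 = j), if_pos (by omega : (2 * j) % 2 = 0),
        if_pos (le_refl (2 * j)), if_pos (by omega : 2 * j ≤ 2 * j + 1),
        if_neg (by omega : ¬ 2 * j + 1 ≤ 2 * j), if_pos (by omega : 2 * j + 1 ≤ 2 * j + 1),
        Nat.sub_self, (by omega : 2 * j + 1 - 2 * j = 1)]
      simp only [Nat.sub_self, List.getD_cons_zero, List.getD_cons_succ]
      ring
    · rcases Nat.lt_or_ge (2 * j + 1) n with h2 | h2
      · rw [if_neg (by omega : ¬ n / 2 = j), if_neg (by omega : ¬ n ≤ 2 * j),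
          if_neg (by omega : ¬ n ≤ 2 * j + 1), if_neg (by omega : ¬ n + 1 ≤ 2 * j),
          if_neg (by omega : ¬ n + 1 ≤ 2 * j + 1)]
        ring
      · have hn : n = 2 * j + 1 := by omega
        subst hn
        rw [if_pos (by omega : (2 * j + 1) / 2 = j), if_neg (by omega : ¬ (2 * j + 1) % 2 = 0),
          if_neg (by omega : ¬ 2 * j + 1 ≤ 2 * j), if_pos (le_refl (2 * j + 1)),
          if_neg (by omega : ¬ 2 * j + 1 + 1 ≤ 2 * j), if_neg (by omega : ¬ 2 * j + 1 + 1 ≤ 2 * j + 1),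
          Nat.sub_self, List.getD_cons_zero]
        ring

def pvW (dy dx : ℕ) : Int := (pvWeights.getD dy []).getD dx 0

def pvGridAdd (W i j : ℕ) : List (List Int) → ℕ → Int
  | [], _ => 0
  | r :: rs, m =>
    (if m / 4 = i then pvCellAdd (pvW (m % 4) 0) (pvW (m % 4) 1) j (r.take W) 0 else 0)
      + pvGridAdd W i j rs (m + 1)

theorem pvTermShift (w0 w1 : Int) (j W y m : ℕ) (r : List Int) (rs : List (List Int)) (h : m < y) :
    (if m + 1 ≤ y ∧ y < m + 1 + rs.length then pvCellAdd w0 w1 j ((rs.getD (y - (m + 1)) []).take W) 0 else 0)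
      = (if m ≤ y ∧ y < m + (r :: rs).length then pvCellAdd w0 w1 j (((r :: rs).getD (y - m) []).take W) 0 else 0) := by
  simp only [List.length_cons]
  by_cases hb : y < m + 1 + rs.length
  · rw [if_pos ⟨by omega, hb⟩, if_pos ⟨by omega, by omega⟩,
      (show y - m = (y - (m + 1)) + 1 by omega), List.getD_cons_succ]
  · rw [if_neg (by omega), if_neg (by omega)]

theorem pvGridAdd_eval (W i j : ℕ) : ∀ (L : List (List Int)) (m : ℕ),
    pvGridAdd W i j L m
      = (if m ≤ 4 * i ∧ 4 * i < m + L.length then pvCellAdd (pvW 0 0) (pvW 0 1) j ((L.getD (4 * i - m) []).take W) 0 else 0)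
        + (if m ≤ 4 * i + 1 ∧ 4 * i + 1 < m + L.length then pvCellAdd (pvW 1 0) (pvW 1 1) j ((L.getD (4 * i + 1 - m) []).take W) 0 else 0)
        + (if m ≤ 4 * i + 2 ∧ 4 * i + 2 < m + L.length then pvCellAdd (pvW 2 0) (pvW 2 1) j ((L.getD (4 * i + 2 - m) []).take W) 0 else 0)
        + (if m ≤ 4 * i + 3 ∧ 4 * i + 3 < m + L.length then pvCellAdd (pvW 3 0) (pvW 3 1) j ((L.getD (4 * i + 3 - m) []).take W) 0 else 0) := by
  intro L
  induction L with
  | nil =>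
    intro m
    rw [pvGridAdd, if_neg (by simp), if_neg (by simp), if_neg (by simp), if_neg (by simp)]
    ring
  | cons r rs ih =>
    intro m
    rw [pvGridAdd, ih (m + 1)]
    rcases (show m < 4*i ∨ m = 4*i ∨ m = 4*i+1 ∨ m = 4*i+2 ∨ m = 4*i+3 ∨ 4*i+3 < m by omega)
      with h | h | h | h | h | h
    · rw [if_neg (show ¬ m / 4 = i by omega),
        pvTermShift (pvW 0 0) (pvW 0 1) j W (4*i) m r rs (by omega),
        pvTermShift (pvW 1 0) (pvW 1 1) j W (4*i+1) m r rs (by omega),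
        pvTermShift (pvW 2 0) (pvW 2 1) j W (4*i+2) m r rs (by omega),
        pvTermShift (pvW 3 0) (pvW 3 1) j W (4*i+3) m r rs (by omega)]
      ring
    · subst h
      rw [if_pos (show (4*i) / 4 = i by omega), (show (4*i) % 4 = 0 by omega),
        pvTermShift (pvW 1 0) (pvW 1 1) j W (4*i+1) (4*i) r rs (by omega),
        pvTermShift (pvW 2 0) (pvW 2 1) j W (4*i+2) (4*i) r rs (by omega),
        pvTermShift (pvW 3 0) (pvW 3 1) j W (4*i+3) (4*i) r rs (by omega),
        (show (if 4*i ≤ 4 * i ∧ 4 * i < 4*i + (r :: rs).length then pvCellAdd (pvW 0 0) (pvW 0 1) j (((r :: rs).getD (4 * i - 4*i) []).take W) 0 else 0)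
           = pvCellAdd (pvW 0 0) (pvW 0 1) j (r.take W) 0 by
          rw [if_pos ⟨le_refl _, by simp⟩, Nat.sub_self, List.getD_cons_zero]),
        if_neg (show ¬ (4*i + 1 ≤ 4 * i ∧ 4 * i < 4*i + 1 + rs.length) by omega)]
      ring
    · subst h
      rw [if_pos (show (4*i+1) / 4 = i by omega), (show (4*i+1) % 4 = 1 by omega),
        pvTermShift (pvW 2 0) (pvW 2 1) j W (4*i+2) (4*i+1) r rs (by omega),
        pvTermShift (pvW 3 0) (pvW 3 1) j W (4*i+3) (4*i+1) r rs (by omega),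
        (show (if 4*i+1 ≤ 4 * i + 1 ∧ 4 * i + 1 < 4*i+1 + (r :: rs).length then pvCellAdd (pvW 1 0) (pvW 1 1) j (((r :: rs).getD (4 * i + 1 - (4*i+1)) []).take W) 0 else 0)
           = pvCellAdd (pvW 1 0) (pvW 1 1) j (r.take W) 0 by
          rw [if_pos ⟨le_refl _, by simp⟩, Nat.sub_self, List.getD_cons_zero]),
        if_neg (show ¬ (4*i+1 ≤ 4 * i ∧ 4 * i < 4*i+1 + (r :: rs).length) by omega),
        if_neg (show ¬ (4*i+1+1 ≤ 4 * i ∧ 4 * i < 4*i+1+1 + rs.length) by omega),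
        if_neg (show ¬ (4*i+1+1 ≤ 4 * i + 1 ∧ 4 * i + 1 < 4*i+1+1 + rs.length) by omega)]
      ring
    · subst h
      rw [if_pos (show (4*i+2) / 4 = i by omega), (show (4*i+2) % 4 = 2 by omega),
        pvTermShift (pvW 3 0) (pvW 3 1) j W (4*i+3) (4*i+2) r rs (by omega),
        (show (if 4*i+2 ≤ 4 * i + 2 ∧ 4 * i + 2 < 4*i+2 + (r :: rs).length then pvCellAdd (pvW 2 0) (pvW 2 1) j (((r :: rs).getD (4 * i + 2 - (4*i+2)) []).take W) 0 else 0)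
           = pvCellAdd (pvW 2 0) (pvW 2 1) j (r.take W) 0 by
          rw [if_pos ⟨le_refl _, by simp⟩, Nat.sub_self, List.getD_cons_zero]),
        if_neg (show ¬ (4*i+2 ≤ 4 * i ∧ 4 * i < 4*i+2 + (r :: rs).length) by omega),
        if_neg (show ¬ (4*i+2 ≤ 4 * i + 1 ∧ 4 * i + 1 < 4*i+2 + (r :: rs).length) by omega),
        if_neg (show ¬ (4*i+2+1 ≤ 4 * i ∧ 4 * i < 4*i+2+1 + rs.length) by omega),
        if_neg (show ¬ (4*i+2+1 ≤ 4 * i + 1 ∧ 4 * i + 1 < 4*i+2+1 + rs.length) by omega),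
        if_neg (show ¬ (4*i+2+1 ≤ 4 * i + 2 ∧ 4 * i + 2 < 4*i+2+1 + rs.length) by omega)]
      ring
    · subst h
      rw [if_pos (show (4*i+3) / 4 = i by omega), (show (4*i+3) % 4 = 3 by omega),
        (show (if 4*i+3 ≤ 4 * i + 3 ∧ 4 * i + 3 < 4*i+3 + (r :: rs).length then pvCellAdd (pvW 3 0) (pvW 3 1) j (((r :: rs).getD (4 * i + 3 - (4*i+3)) []).take W) 0 else 0)
           = pvCellAdd (pvW 3 0) (pvW 3 1) j (r.take W) 0 by
          rw [if_pos ⟨le_refl _, by simp⟩, Nat.sub_self, List.getD_cons_zero]),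
        if_neg (show ¬ (4*i+3 ≤ 4 * i ∧ 4 * i < 4*i+3 + (r :: rs).length) by omega),
        if_neg (show ¬ (4*i+3 ≤ 4 * i + 1 ∧ 4 * i + 1 < 4*i+3 + (r :: rs).length) by omega),
        if_neg (show ¬ (4*i+3 ≤ 4 * i + 2 ∧ 4 * i + 2 < 4*i+3 + (r :: rs).length) by omega),
        if_neg (show ¬ (4*i+3+1 ≤ 4 * i ∧ 4 * i < 4*i+3+1 + rs.length) by omega),
        if_neg (show ¬ (4*i+3+1 ≤ 4 * i + 1 ∧ 4 * i + 1 < 4*i+3+1 + rs.length) by omega),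
        if_neg (show ¬ (4*i+3+1 ≤ 4 * i + 2 ∧ 4 * i + 2 < 4*i+3+1 + rs.length) by omega),
        if_neg (show ¬ (4*i+3+1 ≤ 4 * i + 3 ∧ 4 * i + 3 < 4*i+3+1 + rs.length) by omega)]
      ring
    · rw [if_neg (show ¬ m / 4 = i by omega),
        if_neg (show ¬ (m ≤ 4 * i ∧ 4 * i < m + (r :: rs).length) by omega),
        if_neg (show ¬ (m ≤ 4 * i + 1 ∧ 4 * i + 1 < m + (r :: rs).length) by omega),
        if_neg (show ¬ (m ≤ 4 * i + 2 ∧ 4 * i + 2 < m + (r :: rs).length) by omega),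
        if_neg (show ¬ (m ≤ 4 * i + 3 ∧ 4 * i + 3 < m + (r :: rs).length) by omega),
        if_neg (show ¬ (m + 1 ≤ 4 * i ∧ 4 * i < m + 1 + rs.length) by omega),
        if_neg (show ¬ (m + 1 ≤ 4 * i + 1 ∧ 4 * i + 1 < m + 1 + rs.length) by omega),
        if_neg (show ¬ (m + 1 ≤ 4 * i + 2 ∧ 4 * i + 2 < m + 1 + rs.length) by omega),
        if_neg (show ¬ (m + 1 ≤ 4 * i + 3 ∧ 4 * i + 3 < m + 1 + rs.length) by omega)]
      ring

theorem pvInner (y i j : ℕ) : ∀ (r : List Int) (n : ℕ) (st : List (List Int)),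
    y / 4 < st.length →
    (∀ x, n ≤ x → x < n + r.length → x / 2 < (st.getD (y / 4) []).length) →
    (((PySem.List.enumerate r (n : ℤ)).foldl (fun st2 q =>
        st2.modify (PySem.Int.floordiv ((y : ℕ) : ℤ) 4).toNat (fun row =>
          row.modify (PySem.Int.floordiv q.1 2).toNat
            (· + (pvWeights.getD (PySem.Int.mod ((y : ℕ) : ℤ) 4).toNat []).getD (PySem.Int.mod q.1 2).toNat 0 * q.2))) st).length = st.length
      ∧ (∀ k, (((PySem.List.enumerate r (n : ℤ)).foldl (fun st2 q =>
        st2.modify (PySem.Int.floordiv ((y : ℕ) : ℤ) 4).toNat (fun row =>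
          row.modify (PySem.Int.floordiv q.1 2).toNat
            (· + (pvWeights.getD (PySem.Int.mod ((y : ℕ) : ℤ) 4).toNat []).getD (PySem.Int.mod q.1 2).toNat 0 * q.2))) st).getD k []).length = (st.getD k []).length)
      ∧ pvG ((PySem.List.enumerate r (n : ℤ)).foldl (fun st2 q =>
        st2.modify (PySem.Int.floordiv ((y : ℕ) : ℤ) 4).toNat (fun row =>
          row.modify (PySem.Int.floordiv q.1 2).toNat
            (· + (pvWeights.getD (PySem.Int.mod ((y : ℕ) : ℤ) 4).toNat []).getD (PySem.Int.mod q.1 2).toNat 0 * q.2))) st) i j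
        = pvG st i j + (if y / 4 = i then pvCellAdd (pvW (y % 4) 0) (pvW (y % 4) 1) j r n else 0)) := by
  intro r
  induction r with
  | nil =>
    intro n st h1 h2
    refine ⟨rfl, fun k => rfl, ?_⟩
    simp [PySem.List.enumerate_nil, pvCellAdd]
  | cons v vs ih =>
    intro n st h1 h2
    rw [PySem.List.enumerate_cons]
    simp only [List.foldl_cons]
    have hcast : (n : ℤ) + 1 = ((n + 1 : ℕ) : ℤ) := by push_cast; ring
    rw [hcast]
    -- the state after processing pixel (y, n)
    set st' := st.modify (PySem.Int.floordiv ((y : ℕ) : ℤ) 4).toNat (fun row =>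
          row.modify (PySem.Int.floordiv ((n : ℕ) : ℤ) 2).toNat
            (· + (pvWeights.getD (PySem.Int.mod ((y : ℕ) : ℤ) 4).toNat []).getD (PySem.Int.mod ((n : ℕ) : ℤ) 2).toNat 0 * v)) with hst'
    have hlen' : st'.length = st.length := by rw [hst', List.length_modify]
    have hrow' : ∀ k, (st'.getD k []).length = (st.getD k []).length := by
      intro k
      rw [hst', pvFd4, pvGetD_modify st (y / 4) k _ [] h1]
      split
      · rw [List.length_modify]
      · rfl
    have hg' : pvG st' i j = pvG st i j +
        (if y / 4 = i ∧ n / 2 = j then (pvWeights.getD (y % 4) []).getD (n % 2) 0 * v else 0) := by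
      rw [hst', pvFd4, pvFd2, pvMd4, pvMd2]
      unfold pvG
      rw [pvGetD_modify st (y / 4) i _ [] h1]
      by_cases hyi : y / 4 = i
      · rw [if_pos hyi]
        have hn2 : n / 2 < (st.getD i []).length := hyi ▸ h2 n (le_refl n) (by simp)
        rw [pvGetD_modify _ (n / 2) j _ 0 hn2]
        by_cases hnj : n / 2 = j
        · rw [if_pos hnj, if_pos ⟨hyi, hnj⟩]
        · rw [if_neg hnj, if_neg (by tauto), add_zero]
      · rw [if_neg hyi, if_neg (by tauto), add_zero]
    obtain ⟨l1, l2, l3⟩ := ih (n + 1) st' (hlen' ▸ h1)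
      (fun x hx1 hx2 => by
        rw [hrow' (y / 4)]
        refine h2 x (by omega) ?_
        simp only [List.length_cons]
        omega)
    refine ⟨by rw [l1, hlen'], fun k => by rw [l2 k, hrow' k], ?_⟩
    rw [l3, hg', pvCellAdd]
    by_cases hyi : y / 4 = i
    · simp only [hyi, if_pos rfl, true_and, if_true, ite_true]
      have hw : (pvWeights.getD (y % 4) []).getD (n % 2) 0
          = (if n % 2 = 0 then pvW (y % 4) 0 else pvW (y % 4) 1) := by
        rcases (show n % 2 = 0 ∨ n % 2 = 1 by omega) with h0 | h0 <;> rw [h0] <;> simp [pvW]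
      rw [hw]
      ring
    · rw [if_neg (by tauto), if_neg hyi, if_neg hyi]
      ring

theorem pvOuter (i j NC Wn : ℕ) (hW : Wn ≤ 2 * NC) : ∀ (L : List (List Int)) (m : ℕ) (st : List (List Int)),
    (∀ y, m ≤ y → y < m + L.length → y / 4 < st.length) →
    (∀ k, k < st.length → (st.getD k []).length = NC) →
    (((PySem.List.enumerate L (m : ℤ)).foldl (fun st p =>
        (PySem.List.enumerate (p.2.take Wn)).foldl (fun st2 q =>
          st2.modify (PySem.Int.floordiv p.1 4).toNat (fun row =>
            row.modify (PySem.Int.floordiv q.1 2).toNat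
              (· + (pvWeights.getD (PySem.Int.mod p.1 4).toNat []).getD (PySem.Int.mod q.1 2).toNat 0 * q.2))) st) st).length = st.length
      ∧ (∀ k, k < st.length → (((PySem.List.enumerate L (m : ℤ)).foldl (fun st p =>
        (PySem.List.enumerate (p.2.take Wn)).foldl (fun st2 q =>
          st2.modify (PySem.Int.floordiv p.1 4).toNat (fun row =>
            row.modify (PySem.Int.floordiv q.1 2).toNat
              (· + (pvWeights.getD (PySem.Int.mod p.1 4).toNat []).getD (PySem.Int.mod q.1 2).toNat 0 * q.2))) st) st).getD k []).length = NC)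
      ∧ pvG ((PySem.List.enumerate L (m : ℤ)).foldl (fun st p =>
        (PySem.List.enumerate (p.2.take Wn)).foldl (fun st2 q =>
          st2.modify (PySem.Int.floordiv p.1 4).toNat (fun row =>
            row.modify (PySem.Int.floordiv q.1 2).toNat
              (· + (pvWeights.getD (PySem.Int.mod p.1 4).toNat []).getD (PySem.Int.mod q.1 2).toNat 0 * q.2))) st) st) i j
        = pvG st i j + pvGridAdd Wn i j L m) := by
  intro L
  induction L with
  | nil =>
    intro m st h1 h2
    refine ⟨rfl, h2, ?_⟩
    simp [PySem.List.enumerate_nil, pvGridAdd]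
  | cons r rs ihL =>
    intro m st h1 h2
    rw [PySem.List.enumerate_cons]
    simp only [List.foldl_cons]
    have hcast : (m : ℤ) + 1 = ((m + 1 : ℕ) : ℤ) := by push_cast; ring
    rw [hcast]
    have hm4 : m / 4 < st.length := h1 m (le_refl m) (by simp)
    have hx : ∀ x, 0 ≤ x → x < 0 + (r.take Wn).length → x / 2 < (st.getD (m / 4) []).length := by
      intro x _ hxl
      rw [h2 (m / 4) hm4]
      have : x < Wn := by
        have := List.length_take_le Wn r
        omega
      omega
    have hin := pvInner m i j (r.take Wn) 0 st hm4 hx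
    rw [(show ((0 : ℕ) : ℤ) = (0 : ℤ) by simp)] at hin
    obtain ⟨i1, i2, i3⟩ := hin
    obtain ⟨o1, o2, o3⟩ := ihL (m + 1) _ (fun y hy1 hy2 => by rw [i1]; exact h1 y (by omega) (by simp only [List.length_cons]; omega))
      (fun k hk => by rw [i2 k]; exact h2 k (by rwa [i1] at hk))
    refine ⟨by rw [o1, i1], fun k hk => o2 k (by rwa [i1] at *), ?_⟩
    rw [o3, i3, pvGridAdd]
    ring

theorem pvLookA_eq (ipx : List (List Int)) (m n : ℕ) :
    pvLookA (ipx.map (fun r => r ++ [0]) ++ List.replicate 7 (List.replicate (ipx.headI.length + 1) (0 : Int))) (m : ℤ) (n : ℤ)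
      = pvAt ipx m n := by
  unfold pvLookA pvAt
  simp only [PySem.List.pyGetD_natCast, List.getD_eq_getElem?_getD]
  by_cases hm : m < ipx.length
  · rw [List.getElem?_append_left (by simpa using hm), List.getElem?_map,
      List.getElem?_eq_getElem hm]
    simp only [Option.map_some, Option.getD_some]
    rcases Nat.lt_trichotomy n (ipx[m].length) with hn | hn | hn
    · rw [List.getElem?_append_left hn]
    · subst hn
      rw [List.getElem?_concat_length, List.getElem?_eq_none (by omega)]
      rfl
    · rw [List.getElem?_eq_none (by simp; omega), List.getElem?_eq_none (by omega)]
  · rw [List.getElem?_append_right (by simpa using hm)]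
    have hr : ipx[m]? = none := List.getElem?_eq_none (by omega)
    rw [hr]
    simp only [List.getElem?_replicate, Option.getD_none, List.getElem?_nil]
    split_ifs <;> simp [List.getElem?_replicate] <;> split_ifs <;> rfl

theorem pvRangeStep4 (n : ℕ) : PySem.List.pyRange 0 (n : ℤ) 4 = (List.range ((n + 3) / 4)).map (fun k => ((4 * k : ℕ) : ℤ)) := by
  rw [PySem.List.pyRange_of_pos 0 (n : ℤ) (by norm_num)]
  have : (if (0 : ℤ) < (n : ℤ) then (((n : ℤ) - 0 + 4 - 1) / 4).toNat else 0) = (n + 3) / 4 := by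
    split <;> omega
  rw [this]
  apply List.map_congr_left
  intro k _
  push_cast
  ring

theorem pvRangeStep2 (n : ℕ) : PySem.List.pyRange 0 (n : ℤ) 2 = (List.range ((n + 1) / 2)).map (fun k => ((2 * k : ℕ) : ℤ)) := by
  rw [PySem.List.pyRange_of_pos 0 (n : ℤ) (by norm_num)]
  have : (if (0 : ℤ) < (n : ℤ) then (((n : ℤ) - 0 + 2 - 1) / 2).toNat else 0) = (n + 1) / 2 := by
    split <;> omega
  rw [this]
  apply List.map_congr_left
  intro k _
  push_cast
  ring

theorem pvA_eq_ref (ipx : List (List Int)) : braillepixels ipx = pvRef ipx := by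
  unfold braillepixels pvRef
  rw [pvRangeStep4, List.map_map]
  apply List.map_congr_left
  intro i _
  simp only [Function.comp_apply]
  congr 1
  rw [pvRangeStep2, List.map_map]
  apply List.map_congr_left
  intro j _
  simp only [Function.comp_apply]
  congr 1
  rw [(show ((4 * i : ℕ) : ℤ) + 1 = ((4 * i + 1 : ℕ) : ℤ) by push_cast; ring),
    (show ((4 * i : ℕ) : ℤ) + 2 = ((4 * i + 2 : ℕ) : ℤ) by push_cast; ring),
    (show ((4 * i : ℕ) : ℤ) + 3 = ((4 * i + 3 : ℕ) : ℤ) by push_cast; ring),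
    (show ((2 * j : ℕ) : ℤ) + 1 = ((2 * j + 1 : ℕ) : ℤ) by push_cast; ring),
    pvLookA_eq, pvLookA_eq, pvLookA_eq, pvLookA_eq, pvLookA_eq, pvLookA_eq, pvLookA_eq, pvLookA_eq]
  unfold pvCode
  ring

theorem pvB_eq_ref (ipx : List (List Int)) : braillepixels_alt ipx = pvRef ipx := by
  unfold braillepixels_alt
  have hw : 2 * PySem.Int.floordiv ((ipx.headI.length : ℤ) + 1) 2
      = ((2 * ((ipx.headI.length + 1) / 2) : ℕ) : ℤ) := by
    rw [(show ((ipx.headI.length : ℤ) + 1) = ((ipx.headI.length + 1 : ℕ) : ℤ) by push_cast; ring),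
      pvFdI2]
    push_cast
    ring
  have hr : PySem.Int.floordiv ((ipx.length : ℤ) + 3) 4 = (((ipx.length + 3) / 4 : ℕ) : ℤ) := by
    rw [(show ((ipx.length : ℤ) + 3) = ((ipx.length + 3 : ℕ) : ℤ) by push_cast; ring), pvFdI4]
  simp only [hw, hr, pvFdI2, Int.toNat_natCast,
    (show (2 * ((ipx.headI.length + 1) / 2)) / 2 = (ipx.headI.length + 1) / 2 by omega)]
  -- abbreviations
  set nc := (ipx.headI.length + 1) / 2 with hnc
  set nr := (ipx.length + 3) / 4 with hnr
  set Wn := 2 * nc with hWn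
  set st0 := List.replicate nr (List.replicate nc (0x2800 : Int)) with hst0
  have hlen0 : st0.length = nr := by rw [hst0, List.length_replicate]
  have hrow0 : ∀ k, k < st0.length → (st0.getD k []).length = nc := by
    intro k hk
    rw [hst0, List.getD_eq_getElem?_getD, List.getElem?_replicate,
      if_pos (by rwa [hlen0] at hk), Option.getD_some, List.length_replicate]
  have H := fun (i j : ℕ) => pvOuter i j nc Wn (le_refl _) ipx 0 st0
    (fun y _ hy => by rw [hlen0, hnr]; omega) hrow0
  rw [(show ((0 : ℕ) : ℤ) = (0 : ℤ) by simp)] at H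
  have hF : ((PySem.List.enumerate ipx).foldl (fun st p =>
        (PySem.List.enumerate (p.2.take Wn)).foldl (fun st2 q =>
          st2.modify (PySem.Int.floordiv p.1 4).toNat (fun row =>
            row.modify (PySem.Int.floordiv q.1 2).toNat
              (· + (pvWeights.getD (PySem.Int.mod p.1 4).toNat []).getD (PySem.Int.mod q.1 2).toNat 0 * q.2))) st) st0)
      = (List.range nr).map (fun i => (List.range nc).map (fun j => pvCode ipx (4 * i) (2 * j))) := by
    apply List.ext_getElem
    · rw [(H 0 0).1, hlen0, List.length_map, List.length_range]
    · intro i hi _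
      have hinr : i < nr := by have h := hi; rwa [(H 0 0).1, hlen0] at h
      have hist : i < st0.length := by rw [hlen0]; exact hinr
      have hrowi : (((PySem.List.enumerate ipx).foldl (fun st p =>
            (PySem.List.enumerate (p.2.take Wn)).foldl (fun st2 q =>
              st2.modify (PySem.Int.floordiv p.1 4).toNat (fun row =>
                row.modify (PySem.Int.floordiv q.1 2).toNat
                  (· + (pvWeights.getD (PySem.Int.mod p.1 4).toNat []).getD (PySem.Int.mod q.1 2).toNat 0 * q.2))) st) st0).getD i []).length = nc :=
        (H 0 0).2.1 i hist
      rw [List.getD_eq_getElem?_getD, List.getElem?_eq_getElem hi] at hrowi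
      simp only [Option.getD_some] at hrowi
      rw [List.getElem_map, List.getElem_range]
      apply List.ext_getElem
      · rw [List.length_map, List.length_range]
        exact hrowi
      · intro j hj _
        have hjnc : j < nc := by rw [hrowi] at hj; exact hj
        rw [List.getElem_map, List.getElem_range]
        have hv := (H i j).2.2
        have hg0 : pvG st0 i j = 0x2800 := by
          simp [pvG, hst0, List.getD_eq_getElem?_getD, List.getElem?_replicate, hinr, hjnc]
        have hcell : ∀ (w0 w1 : Int) (y : ℕ),
            pvCellAdd w0 w1 j ((ipx.getD y []).take Wn) 0
              = w0 * pvAt ipx y (2 * j) + w1 * pvAt ipx y (2 * j + 1) := by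
          intro w0 w1 y
          rw [pvCellAdd_eval, if_pos (by omega), if_pos (by omega), Nat.sub_zero, Nat.sub_zero,
            pvGetD_take _ _ _ (by omega), pvGetD_take _ _ _ (by omega)]
          rfl
        rw [pvGridAdd_eval] at hv
        simp only [Nat.sub_zero, Nat.zero_le, true_and, Nat.zero_add, zero_add] at hv
        have hite : ∀ (w0 w1 : Int) (y : ℕ),
            (if y < ipx.length then pvCellAdd w0 w1 j ((ipx.getD y []).take Wn) 0 else 0)
              = w0 * pvAt ipx y (2 * j) + w1 * pvAt ipx y (2 * j + 1) := by
          intro w0 w1 y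
          by_cases hy : y < ipx.length
          · rw [if_pos hy, hcell]
          · rw [if_neg hy]
            have hnil : ipx.getD y [] = [] := by
              rw [List.getD_eq_getElem?_getD, List.getElem?_eq_none (by omega)]
              rfl
            unfold pvAt
            rw [hnil]
            simp [pvCellAdd]
        rw [hite, hite, hite, hite, hg0,
          (show pvW 0 0 = (1 : ℤ) from rfl), (show pvW 0 1 = (8 : ℤ) from rfl),
          (show pvW 1 0 = (2 : ℤ) from rfl), (show pvW 1 1 = (16 : ℤ) from rfl),
          (show pvW 2 0 = (4 : ℤ) from rfl), (show pvW 2 1 = (32 : ℤ) from rfl),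
          (show pvW 3 0 = (64 : ℤ) from rfl), (show pvW 3 1 = (128 : ℤ) from rfl)] at hv
        have hgF := pvG_getElem _ i j hi hj
        rw [← hgF, hv]
        unfold pvCode
        ring
  rw [hF]
  unfold pvRef
  rw [← hnc, ← hnr]
  simp [Function.comp_def]

-- ===== VERDICT (by name: the statement is the Claim_ definition above) =====
theorem braillepixels_spec : Claim_equal_braillepixels := by
  intro ipx _ _
  unfold Spec_braillepixels
  rw [pvA_eq_ref, pvB_eq_ref]
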